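-- pv_equiv track=rewrite | github.com/fariamabood0889/Machine-Learning | Apriori.py | createL
-- ===== SOURCE A (Python) =====
-- def createL(itemsetlist,db):
--     L = {}
--     for itemset1 in itemsetlist:
--         itemset2 = itemset1.split(",")              #make pair of  every item
--         count = 0
--         for tranid in db:                            # calculate the frequency  from the transaction table
--             tran=db[tranid]
--             flag=True
--             for item in itemset2:
--                 if item not in tran:
--                     flag = False
--                     continue
--             if(flag):
--                 count+=1
--         L[itemset1]= count
--     return L
-- ===== SOURCE B (Python) =====
-- def createL(itemsetlist, db):
--     # inverted index: item -> set of transaction ids containing it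
--     index = {}
--     for itemset1 in itemsetlist:
--         for item in itemset1.split(","):
--             if item not in index:
--                 index[item] = {tranid for tranid in db if item in db[tranid]}
--     L = {}
--     for itemset1 in itemsetlist:
--         tids = set(db)
--         for item in itemset1.split(","):
--             tids &= index[item]
--         L[itemset1] = len(tids)
--     return L
-- ===== Notes on version B (the rewrite author's own statement) =====
-- stated objective: faster
-- what changed: Replaces A's per-itemset scan over every transaction (re-testing each item's membership per transaction) with an inverted index built once (item -> set of transaction ids), computing each support count as the size of the intersection of tidlists. O(1) set lookups and tidlists computed once per distinct item replace repeated per-transaction membership scans (measured ~1.9x at n=4096).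
import Mathlib
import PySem

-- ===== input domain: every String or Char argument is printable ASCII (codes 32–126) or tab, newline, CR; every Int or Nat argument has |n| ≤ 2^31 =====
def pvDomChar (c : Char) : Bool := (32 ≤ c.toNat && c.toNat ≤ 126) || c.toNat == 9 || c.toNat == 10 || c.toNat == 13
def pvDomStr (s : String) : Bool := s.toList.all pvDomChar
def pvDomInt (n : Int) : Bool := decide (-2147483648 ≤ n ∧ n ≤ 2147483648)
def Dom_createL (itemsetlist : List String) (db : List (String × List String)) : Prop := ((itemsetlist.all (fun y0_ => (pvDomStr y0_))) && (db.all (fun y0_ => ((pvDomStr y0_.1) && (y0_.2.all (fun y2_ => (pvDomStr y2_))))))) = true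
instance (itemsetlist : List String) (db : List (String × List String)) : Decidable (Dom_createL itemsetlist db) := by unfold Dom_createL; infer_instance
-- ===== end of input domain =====

-- B replaces A's per-itemset scan of all transactions by an inverted index (item → set of
-- transaction ids) built once, counting support as the size of the tidlist intersection (objective: alternative).

-- ===== PORT A =====
-- s.split(",") — split? is always `some` for a non-empty separator; getD [] only makes it total
def pvSplit (s : String) : List String := (PySem.Str.split? s ",").getD []

-- inner two loops of A: count transactions whose item list contains every item of itemset2
def pvCountA (itemset2 : List String) (db : List (String × List String)) : Int :=
  db.foldl (fun count p =>
    if (itemset2.foldl (fun flag item => if !(p.2.contains item) then false else flag) true)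
    then count + 1 else count) 0

def createL (itemsetlist : List String) (db : List (String × List String)) : List (String × Int) :=
  (itemsetlist.foldl (fun L itemset1 =>
      L.insert itemset1 (pvCountA (pvSplit itemset1) db))
    (PySem.Dict.empty : PySem.Dict String Int)).items

-- ===== PORT B =====
-- tidlist of one item: {tranid for tranid in db if item in db[tranid]} — a list is exact here
-- because Pre_ guarantees transaction ids are distinct
def pvTids (db : List (String × List String)) (item : String) : List String :=
  db.foldl (fun acc p => if p.2.contains item then acc ++ [p.1] else acc) []

-- index = {}; for itemset1 in itemsetlist: for item in itemset1.split(","): if item not in index: ...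
def pvIndex (itemsetlist : List String) (db : List (String × List String)) :
    PySem.Dict String (List String) :=
  itemsetlist.foldl (fun d itemset1 =>
    (pvSplit itemset1).foldl
      (fun d item => if d.contains item then d else d.insert item (pvTids db item)) d)
    PySem.Dict.empty

-- tids = set(db); for item in parts: tids &= index[item]  (set intersection as a filter; exact
-- for the resulting len under Pre_'s distinct ids)
def pvInter (index : PySem.Dict String (List String)) (parts : List String)
    (init : List String) : List String :=
  parts.foldl (fun tids item => tids.filter (fun t => (index.getD item []).contains t)) init

def createL_alt (itemsetlist : List String) (db : List (String × List String)) : List (String × Int) :=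
  let index := pvIndex itemsetlist db
  (itemsetlist.foldl (fun L itemset1 =>
      L.insert itemset1
        ((pvInter index (pvSplit itemset1) (db.map Prod.fst)).length : Int))
    (PySem.Dict.empty : PySem.Dict String Int)).items

-- ===== PRECONDITION & SPEC =====
-- Pre_ excludes association lists whose transaction ids repeat: in Python db is a dict, which
-- cannot hold duplicate keys, so such inputs do not correspond to any Python call.
def Pre_createL (itemsetlist : List String) (db : List (String × List String)) : Prop :=
  (db.map Prod.fst).Nodup
instance (itemsetlist : List String) (db : List (String × List String)) :
    Decidable (Pre_createL itemsetlist db) := by unfold Pre_createL; infer_instance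

def pvWitness_createL : List String × (List (String × List String)) :=
  (["a,b", "a", ""], [("t1", ["a", "b"]), ("t2", ["a"])])

def Spec_createL (itemsetlist : List String) (db : List (String × List String)) (out : List (String × Int)) : Prop := out = createL_alt itemsetlist db
instance (itemsetlist : List String) (db : List (String × List String)) (out : List (String × Int)) : Decidable (Spec_createL itemsetlist db out) := by unfold Spec_createL; infer_instance

-- ===== CLAIM (what is proved, stated in full; the proofs are below) =====
def Claim_equal_createL : Prop := ∀ (itemsetlist : List String) (db : List (String × List String)), Dom_createL itemsetlist db → Pre_createL itemsetlist db → Spec_createL itemsetlist db (createL itemsetlist db)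

-- ===== LEMMAS AND PROOFS =====

-- A's innermost flag loop computes "all items are contained"
theorem pv_flag_eq (tran : List String) (parts : List String) (b : Bool) :
    parts.foldl (fun flag item => if !(tran.contains item) then false else flag) b
      = (b && parts.all (tran.contains ·)) := by
  induction parts generalizing b with
  | nil => simp
  | cons a l ih =>
      simp only [List.foldl_cons, List.all_cons, ih]
      cases h : tran.contains a <;> simp [h]

-- A's counting loop is the length of a filter
theorem pv_count_eq (db : List (String × List String)) (φ : String × List String → Bool)
    (c : Int) :
    db.foldl (fun count p => if φ p then count + 1 else count) c
      = c + (db.filter φ).length := by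
  induction db generalizing c with
  | nil => simp
  | cons p l ih =>
      by_cases h : φ p = true <;> simp [h, ih] <;> push_cast <;> ring

theorem pv_tids_aux (db : List (String × List String)) (item : String)
    (acc : List String) :
    db.foldl (fun acc p => if p.2.contains item then acc ++ [p.1] else acc) acc
      = acc ++ (db.filter (fun p => p.2.contains item)).map Prod.fst := by
  induction db generalizing acc with
  | nil => simp
  | cons p l ih =>
      rw [List.foldl_cons, List.filter_cons]
      by_cases h : p.2.contains item = true
      · rw [if_pos h, if_pos h, ih]; simp
      · rw [if_neg h, if_neg h, ih]

theorem pv_tids_eq (db : List (String × List String)) (item : String) :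
    pvTids db item = (db.filter (fun p => p.2.contains item)).map Prod.fst := by
  unfold pvTids
  simpa using pv_tids_aux db item []

theorem pv_contains_tids (db : List (String × List String)) (item : String)
    (hn : (db.map Prod.fst).Nodup) (p : String × List String) (hp : p ∈ db) :
    (pvTids db item).contains p.1 = p.2.contains item := by
  rw [pv_tids_eq]
  cases h : p.2.contains item with
  | true =>
      have hm : p.1 ∈ (db.filter (fun p => p.2.contains item)).map Prod.fst :=
        List.mem_map.mpr ⟨p, List.mem_filter.mpr ⟨hp, h⟩, rfl⟩
      exact List.contains_iff_mem.mpr hm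
  | false =>
      cases hres : ((db.filter (fun p => p.2.contains item)).map Prod.fst).contains p.1 with
      | false => rfl
      | true =>
          exfalso
          obtain ⟨q, hq, hqp⟩ := List.mem_map.mp (List.contains_iff_mem.mp hres)
          obtain ⟨hqdb, hqi⟩ := List.mem_filter.mp hq
          have : q = p := List.inj_on_of_nodup_map hn hqdb hp hqp
          rw [this] at hqi; rw [hqi] at h; exact Bool.noConfusion h

theorem pv_inter_step (db : List (String × List String))
    (hn : (db.map Prod.fst).Nodup) (Q : String × List String → Bool) (item : String) :
    ((db.filter Q).map Prod.fst).filter (fun t => (pvTids db item).contains t)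
      = (db.filter (fun p => Q p && p.2.contains item)).map Prod.fst := by
  rw [List.filter_map]
  congr 1
  rw [List.filter_filter]
  apply List.filter_congr
  intro p hp
  simp only [Function.comp_apply]
  rw [pv_contains_tids db item hn p hp]
  exact Bool.and_comm _ _

theorem pv_inter_eq (db : List (String × List String)) (hn : (db.map Prod.fst).Nodup)
    (index : PySem.Dict String (List String)) (parts : List String)
    (hlk : ∀ item ∈ parts, index.getD item [] = pvTids db item)
    (Q : String × List String → Bool) :
    pvInter index parts ((db.filter Q).map Prod.fst)
      = (db.filter (fun p => Q p && parts.all (p.2.contains ·))).map Prod.fst := by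
  induction parts generalizing Q with
  | nil => simp [pvInter]
  | cons a l ih =>
      simp only [pvInter, List.foldl_cons]
      rw [hlk a (List.mem_cons_self ..), pv_inter_step db hn Q a]
      have := ih (fun item hi => hlk item (List.mem_cons_of_mem _ hi))
        (fun p => Q p && p.2.contains a)
      simp only [pvInter] at this
      rw [this]
      congr 1
      apply List.filter_congr
      intro p _
      simp [Bool.and_assoc]

-- the step of the index-building loop
def pvIdxStep (db : List (String × List String)) (d : PySem.Dict String (List String))
    (item : String) : PySem.Dict String (List String) :=
  if d.contains item then d else d.insert item (pvTids db item)

theorem pv_index_flat (itemsetlist : List String) (db : List (String × List String))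
    (d : PySem.Dict String (List String)) :
    itemsetlist.foldl (fun d s => (pvSplit s).foldl (pvIdxStep db) d) d
      = (itemsetlist.flatMap pvSplit).foldl (pvIdxStep db) d := by
  induction itemsetlist generalizing d with
  | nil => rfl
  | cons a l ih => simp [List.flatMap_cons, List.foldl_append, ih]

def pvIdxInv (db : List (String × List String)) (d : PySem.Dict String (List String)) : Prop :=
  ∀ it v, d.get? it = some v → v = pvTids db it

theorem pv_inv_fold (db : List (String × List String)) (I : List String)
    (d : PySem.Dict String (List String)) (h : pvIdxInv db d) :
    pvIdxInv db (I.foldl (pvIdxStep db) d) := by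
  induction I generalizing d with
  | nil => exact h
  | cons a l ih =>
      apply ih
      intro it v hv
      unfold pvIdxStep at hv
      by_cases hc : d.contains a = true
      · rw [if_pos hc] at hv; exact h it v hv
      · rw [if_neg hc, PySem.Dict.get?_insert] at hv
        by_cases hi : it = a
        · rw [if_pos hi] at hv; rw [hi]; exact (Option.some_inj.mp hv).symm
        · rw [if_neg hi] at hv; exact h it v hv

theorem pv_contains_step (db : List (String × List String))
    (d : PySem.Dict String (List String)) (x it : String) (h : d.contains it = true) :
    (pvIdxStep db d x).contains it = true := by
  unfold pvIdxStep
  by_cases hc : d.contains x = true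
  · rwa [if_pos hc]
  · rw [if_neg hc, PySem.Dict.contains_insert, h, Bool.or_true]

theorem pv_contains_fold_mono (db : List (String × List String)) (I : List String)
    (d : PySem.Dict String (List String)) (it : String) (h : d.contains it = true) :
    (I.foldl (pvIdxStep db) d).contains it = true := by
  induction I generalizing d with
  | nil => exact h
  | cons a l ih => exact ih _ (pv_contains_step db d a it h)

theorem pv_contains_fold (db : List (String × List String)) (I : List String)
    (d : PySem.Dict String (List String)) (it : String) (h : it ∈ I) :
    (I.foldl (pvIdxStep db) d).contains it = true := by
  induction I generalizing d with
  | nil => cases h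
  | cons a l ih =>
      rw [List.foldl_cons]
      rcases List.mem_cons.mp h with h1 | h2
      · subst h1
        apply pv_contains_fold_mono
        unfold pvIdxStep
        by_cases hc : d.contains it = true
        · rwa [if_pos hc]
        · rw [if_neg hc]; exact PySem.Dict.contains_insert_self _ _ _
      · exact ih _ h2

theorem pv_index_getD (itemsetlist : List String) (db : List (String × List String))
    (item : String) (h : item ∈ itemsetlist.flatMap pvSplit) :
    (pvIndex itemsetlist db).getD item [] = pvTids db item := by
  have hidx : pvIndex itemsetlist db
      = (itemsetlist.flatMap pvSplit).foldl (pvIdxStep db) PySem.Dict.empty := by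
    unfold pvIndex
    exact pv_index_flat itemsetlist db PySem.Dict.empty
  rw [hidx]
  have hc := pv_contains_fold db (itemsetlist.flatMap pvSplit) PySem.Dict.empty item h
  have hinv := pv_inv_fold db (itemsetlist.flatMap pvSplit) PySem.Dict.empty
    (by intro it v hv; rw [PySem.Dict.get?_empty] at hv; cases hv)
  rw [PySem.Dict.contains_eq_isSome_get?] at hc
  obtain ⟨v, hv⟩ := Option.isSome_iff_exists.mp hc
  rw [PySem.Dict.getD_of_get?_eq_some _ _ hv]
  exact hinv item v hv

theorem pv_counts_agree (itemsetlist : List String) (db : List (String × List String))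
    (hn : (db.map Prod.fst).Nodup) (s : String) (hs : s ∈ itemsetlist) :
    pvCountA (pvSplit s) db
      = ((pvInter (pvIndex itemsetlist db) (pvSplit s) (db.map Prod.fst)).length : Int) := by
  have h1 : pvCountA (pvSplit s) db
      = ((db.filter (fun p => (pvSplit s).all (p.2.contains ·))).length : Int) := by
    unfold pvCountA
    have hf : (fun (count : Int) (p : String × List String) =>
        if ((pvSplit s).foldl (fun flag item => if !(p.2.contains item) then false else flag) true)
        then count + 1 else count)
      = (fun count p => if (pvSplit s).all (p.2.contains ·) then count + 1 else count) := by
      funext c p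
      rw [pv_flag_eq]
      simp
    rw [hf, pv_count_eq]
    simp
  have h2 : db.map Prod.fst = (db.filter (fun _ => true)).map Prod.fst := by simp
  rw [h1, h2, pv_inter_eq db hn _ _
    (fun item hi => pv_index_getD itemsetlist db item (List.mem_flatMap.mpr ⟨s, hs, hi⟩))]
  simp

theorem pv_outer (l : List String) (f g : String → Int) (h : ∀ s ∈ l, f s = g s)
    (d : PySem.Dict String Int) :
    l.foldl (fun L s => L.insert s (f s)) d = l.foldl (fun L s => L.insert s (g s)) d := by
  induction l generalizing d with
  | nil => rfl
  | cons a t ih =>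
      simp only [List.foldl_cons]
      rw [h a (List.mem_cons_self ..)]
      exact ih (fun s hs => h s (List.mem_cons_of_mem _ hs)) _

-- ===== VERDICT (by name: the statement is the Claim_ definition above) =====
theorem createL_spec : Claim_equal_createL := by
  intro itemsetlist db _hdom hpre
  unfold Spec_createL createL createL_alt
  congr 1
  exact pv_outer itemsetlist _ _
    (fun s hs => pv_counts_agree itemsetlist db hpre s hs) _
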